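-- pv_equiv track=rewrite | github.com/jupyter/papyri | papyri/utils.py | pos_to_nl
-- ===== SOURCE A (Python) =====
-- from typing import Tuple, NewType
--
-- def pos_to_nl(script: str, pos: int) -> Tuple[int, int]:
--     """
--     Convert pigments position to Jedi col/line
--     """
--     rest = pos
--     ln = 0
--     for line in script.splitlines():
--         if len(line) < rest:
--             rest -= len(line) + 1
--             ln += 1
--         else:
--             return ln, rest
--     raise RuntimeError
-- ===== SOURCE B (Python) =====
-- from bisect import bisect_right
-- from typing import Tuple
--
--
-- def pos_to_nl(script: str, pos: int) -> Tuple[int, int]: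
--     """
--     Convert pigments position to Jedi col/line
--     """
--     cum = []
--     total = 0
--     for line in script.splitlines():
--         total += len(line) + 1
--         cum.append(total)
--     i = bisect_right(cum, pos)
--     if i == len(cum):
--         raise RuntimeError
--     return i, pos - (cum[i - 1] if i > 0 else 0)
-- ===== Notes on version B (the rewrite author's own statement) =====
-- stated objective: alternative
-- what changed: Replaces A's sequential subtraction scan over the lines with a cumulative prefix-sum table over line lengths plus a bisect_right binary search for the containing line.
import Mathlib
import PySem

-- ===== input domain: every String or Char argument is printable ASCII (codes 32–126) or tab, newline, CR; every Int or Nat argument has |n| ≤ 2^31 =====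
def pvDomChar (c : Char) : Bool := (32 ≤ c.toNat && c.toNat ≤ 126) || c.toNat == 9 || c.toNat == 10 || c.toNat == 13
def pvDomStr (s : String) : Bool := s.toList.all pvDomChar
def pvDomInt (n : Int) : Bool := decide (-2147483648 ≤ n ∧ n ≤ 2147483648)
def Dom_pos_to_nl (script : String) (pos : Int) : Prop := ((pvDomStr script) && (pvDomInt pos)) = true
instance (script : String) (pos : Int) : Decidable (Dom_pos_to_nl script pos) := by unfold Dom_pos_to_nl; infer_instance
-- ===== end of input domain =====

-- B replaces A's sequential subtraction scan with a prefix-sum table + bisect_right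
-- binary search (objective: alternative decomposition, same asymptotic cost per call).

-- ===== PORT A =====
-- the for-loop over script.splitlines(); none = the final 'raise RuntimeError'
def posToNlLoopA : List String → Int → Int → Option (Int × Int)
  | [], _, _ => none
  | line :: ls, ln, rest =>
      if ((PySem.Str.len line : Int)) < rest then
        posToNlLoopA ls (ln + 1) (rest - ((PySem.Str.len line : Int) + 1))
      else some (ln, rest)

def pos_to_nl (script : String) (pos : Int) : Int × Int :=
  (posToNlLoopA (PySem.Str.splitlines script) 0 pos).getD (0, 0)
  -- .getD (0,0): Python raises RuntimeError exactly where the loop yields none; excluded by Pre_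

-- ===== PORT B =====
def pos_to_nl_alt (script : String) (pos : Int) : Int × Int :=
  let cum := ((PySem.Str.splitlines script).foldl
      (fun (p : List Int × Int) line =>
        let total := p.2 + (PySem.Str.len line : Int) + 1
        (p.1 ++ [total], total)) ([], 0)).1
  let i := PySem.List.bisectRight cum pos
  if i = cum.length then (0, 0)  -- Python raises RuntimeError here; excluded by Pre_
  else ((i : Int), pos - (if 0 < i then cum.getD (i - 1) 0 else 0))

-- ===== PRECONDITION & SPEC =====
-- Pre_ excludes exactly the inputs on which A's loop falls through and A raises RuntimeError:
-- an empty line list, or pos at/after the cumulative end of the last line (B raises there too).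
def Pre_pos_to_nl (script : String) (pos : Int) : Prop :=
  PySem.Str.splitlines script ≠ [] ∧
  pos < ((PySem.Str.splitlines script).map (fun l => (PySem.Str.len l : Int) + 1)).sum

instance (script : String) (pos : Int) : Decidable (Pre_pos_to_nl script pos) := by
  unfold Pre_pos_to_nl; infer_instance

def pvWitness_pos_to_nl : String × Int := ("a\nbc", 3)

def Spec_pos_to_nl (script : String) (pos : Int) (out : Int × Int) : Prop := out = pos_to_nl_alt script pos
instance (script : String) (pos : Int) (out : Int × Int) : Decidable (Spec_pos_to_nl script pos out) := by unfold Spec_pos_to_nl; infer_instance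

-- ===== CLAIM (what is proved, stated in full; the proofs are below) =====
def Claim_equal_pos_to_nl : Prop := ∀ (script : String) (pos : Int), Dom_pos_to_nl script pos → Pre_pos_to_nl script pos → Spec_pos_to_nl script pos (pos_to_nl script pos)

-- ===== LEMMAS AND PROOFS =====

-- the prefix-sum table of (len line + 1) starting from a base offset
def cumOf : List String → Int → List Int
  | [], _ => []
  | l :: ls, base => (base + (PySem.Str.len l : Int) + 1) :: cumOf ls (base + (PySem.Str.len l : Int) + 1)

-- first index i with pos < c[i] (list length if none): the reference search
def linIdx : List Int → Int → Nat
  | [], _ => 0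
  | c :: cs, pos => if pos < c then 0 else linIdx cs pos + 1

lemma cumOf_length (lines : List String) (base : Int) : (cumOf lines base).length = lines.length := by
  induction lines generalizing base with
  | nil => rfl
  | cons l ls ih => simp [cumOf, ih]

lemma foldl_cum (lines : List String) (acc : List Int) (base : Int) :
    (lines.foldl (fun (p : List Int × Int) line =>
        let total := p.2 + (PySem.Str.len line : Int) + 1
        (p.1 ++ [total], total)) (acc, base)).1 = acc ++ cumOf lines base := by
  induction lines generalizing acc base with
  | nil => simp [cumOf]
  | cons l ls ih =>
      exact (ih (acc ++ [base + (PySem.Str.len l : Int) + 1])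
        (base + (PySem.Str.len l : Int) + 1)).trans (by simp [cumOf])

lemma cumOf_lt (lines : List String) (base : Int) : ∀ x ∈ cumOf lines base, base < x := by
  induction lines generalizing base with
  | nil => simp [cumOf]
  | cons l ls ih =>
      intro x hx
      simp only [cumOf, List.mem_cons] at hx
      rcases hx with h | h
      · have : (0 : Int) ≤ (PySem.Str.len l : Int) := Int.natCast_nonneg _
        omega
      · have h1 := ih _ _ h
        have : (0 : Int) ≤ (PySem.Str.len l : Int) := Int.natCast_nonneg _
        omega

lemma cumOf_sorted (lines : List String) (base : Int) :
    List.Pairwise (fun a b => a ≤ b) (cumOf lines base) := by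
  induction lines generalizing base with
  | nil => simp [cumOf]
  | cons l ls ih =>
      simp only [cumOf, List.pairwise_cons]
      exact ⟨fun x hx => le_of_lt (cumOf_lt ls _ x hx), ih _⟩

lemma cumOf_last (lines : List String) (base : Int) (h : lines ≠ []) :
    (cumOf lines base).getD (lines.length - 1) 0 =
      base + (lines.map (fun l => (PySem.Str.len l : Int) + 1)).sum := by
  induction lines generalizing base with
  | nil => exact absurd rfl h
  | cons l ls ih =>
      by_cases hls : ls = []
      · subst hls; simp [cumOf]; ring
      · have hlen : 0 < ls.length := List.length_pos_iff.mpr hls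
        simp only [cumOf, List.length_cons]
        have hidx : ls.length + 1 - 1 = (ls.length - 1) + 1 := by omega
        rw [hidx]
        simp only [List.getD_cons_succ]
        rw [ih _ hls]
        simp [List.sum_cons]
        ring

-- linIdx satisfies bisect_right's characterising properties on a sorted list
lemma linIdx_le_length (cs : List Int) (pos : Int) : linIdx cs pos ≤ cs.length := by
  induction cs with
  | nil => simp [linIdx]
  | cons c cs ih =>
      by_cases h : pos < c
      · simp [linIdx, h]
      · simp only [linIdx, if_neg h, List.length_cons]
        omega

lemma linIdx_lower (cs : List Int) (pos : Int) :
    ∀ (j : Nat) (hj : j < cs.length), j < linIdx cs pos → cs[j] ≤ pos := by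
  induction cs with
  | nil => simp
  | cons c cs ih =>
      intro j hj hlt
      by_cases h : pos < c
      · simp [linIdx, h] at hlt
      · simp only [linIdx, if_neg h] at hlt
        cases j with
        | zero => simpa using not_lt.mp h
        | succ j => exact ih j (by simpa using hj) (by omega)

lemma linIdx_upper (cs : List Int) (pos : Int) (hs : List.Pairwise (fun a b => a ≤ b) cs) :
    ∀ (j : Nat) (hj : j < cs.length), linIdx cs pos ≤ j → pos < cs[j] := by
  induction cs with
  | nil => simp
  | cons c cs ih =>
      intro j hj hle
      rcases List.pairwise_cons.mp hs with ⟨hc, hcs⟩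
      by_cases h : pos < c
      · cases j with
        | zero => simpa using h
        | succ j =>
            have hj' : j < cs.length := by simpa using hj
            have hle' := hc _ (List.getElem_mem hj')
            simp only [List.getElem_cons_succ]
            omega
      · simp only [linIdx, if_neg h] at hle
        cases j with
        | zero => omega
        | succ j => exact ih hcs j (by simpa using hj) (by omega)

-- hence linIdx agrees with PySem's bisectRight on sorted lists
lemma linIdx_eq_bisectRight (cs : List Int) (pos : Int)
    (hs : List.Pairwise (fun a b => a ≤ b) cs) :
    linIdx cs pos = PySem.List.bisectRight cs pos := by
  obtain ⟨hb1, hb2, hb3⟩ := PySem.List.bisectRight_spec cs pos hs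
  by_contra hne
  rcases Nat.lt_or_ge (linIdx cs pos) (PySem.List.bisectRight cs pos) with h | h
  · have hj : linIdx cs pos < cs.length := lt_of_lt_of_le h hb1
    have h1 := hb2 (linIdx cs pos) hj h
    have h2 := linIdx_upper cs pos hs (linIdx cs pos) hj le_rfl
    omega
  · have h' : PySem.List.bisectRight cs pos < linIdx cs pos := by omega
    have hj : PySem.List.bisectRight cs pos < cs.length :=
      lt_of_lt_of_le h' (linIdx_le_length cs pos)
    have h1 := linIdx_lower cs pos (PySem.List.bisectRight cs pos) hj h'
    have h2 := hb3 (PySem.List.bisectRight cs pos) hj le_rfl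
    omega

-- A's loop computes the linear-search answer over the prefix-sum table
lemma loopA_eq (lines : List String) (ln base pos : Int) :
    posToNlLoopA lines ln (pos - base) =
      (if linIdx (cumOf lines base) pos < lines.length then
        some (ln + (linIdx (cumOf lines base) pos : Int),
              pos - (if linIdx (cumOf lines base) pos = 0 then base
                     else (cumOf lines base).getD (linIdx (cumOf lines base) pos - 1) 0))
       else none) := by
  induction lines generalizing ln base with
  | nil => simp [posToNlLoopA, cumOf, linIdx]
  | cons l ls ih =>
      by_cases h : pos < base + (PySem.Str.len l : Int) + 1
      · have hnl : ¬ ((PySem.Str.len l : Int) < pos - base) := by omega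
        simp only [posToNlLoopA, if_neg hnl, cumOf, linIdx, if_pos h, List.length_cons]
        simp
      · have hlt : (PySem.Str.len l : Int) < pos - base := by omega
        have harg : pos - base - ((PySem.Str.len l : Int) + 1)
            = pos - (base + (PySem.Str.len l : Int) + 1) := by ring
        simp only [posToNlLoopA, if_pos hlt, harg,
          ih (ln + 1) (base + (PySem.Str.len l : Int) + 1), cumOf, linIdx, if_neg h,
          List.length_cons]
        generalize linIdx (cumOf ls (base + (PySem.Str.len l : Int) + 1)) pos = i0
        by_cases hi : i0 < ls.length
        · rw [if_pos hi, if_pos (by omega : i0 + 1 < ls.length + 1)]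
          simp only [Option.some.injEq, Prod.mk.injEq]
          refine ⟨by push_cast; ring, ?_⟩
          rw [if_neg (by omega : ¬ (i0 + 1 = 0)), Nat.add_sub_cancel]
          cases i0 with
          | zero => simp
          | succ k => simp
        · rw [if_neg hi, if_neg (by omega : ¬ (i0 + 1 < ls.length + 1))]

-- ===== VERDICT (by name: the statement is the Claim_ definition above) =====
theorem pos_to_nl_spec : Claim_equal_pos_to_nl := by
  intro script pos _ hpre
  obtain ⟨hne, hsum⟩ := hpre
  unfold Spec_pos_to_nl pos_to_nl pos_to_nl_alt
  rw [foldl_cum (PySem.Str.splitlines script) [] 0]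
  simp only [List.nil_append]
  have hsorted := cumOf_sorted (PySem.Str.splitlines script) 0
  have hlen : (cumOf (PySem.Str.splitlines script) 0).length = (PySem.Str.splitlines script).length :=
    cumOf_length (PySem.Str.splitlines script) 0
  rw [linIdx_eq_bisectRight (cumOf (PySem.Str.splitlines script) 0) pos hsorted |>.symm]
  have hlpos : 0 < (PySem.Str.splitlines script).length := List.length_pos_iff.mpr hne
  have hi : linIdx (cumOf (PySem.Str.splitlines script) 0) pos < (PySem.Str.splitlines script).length := by
    by_contra hge
    rw [not_lt] at hge
    have hj : (PySem.Str.splitlines script).length - 1 < (cumOf (PySem.Str.splitlines script) 0).length := by omega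
    have h1 := linIdx_lower (cumOf (PySem.Str.splitlines script) 0) pos
      ((PySem.Str.splitlines script).length - 1) hj (by omega)
    have hlast := cumOf_last (PySem.Str.splitlines script) 0 hne
    rw [List.getD_eq_getElem _ 0 hj] at hlast
    omega
  rw [show posToNlLoopA (PySem.Str.splitlines script) 0 pos
        = posToNlLoopA (PySem.Str.splitlines script) 0 (pos - 0) by norm_num,
      loopA_eq (PySem.Str.splitlines script) 0 0 pos, if_pos hi,
      if_neg (by omega : ¬ (linIdx (cumOf (PySem.Str.splitlines script) 0) pos
        = (cumOf (PySem.Str.splitlines script) 0).length))]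
  simp only [Option.getD_some, Prod.mk.injEq]
  refine ⟨by omega, ?_⟩
  rcases Nat.eq_zero_or_pos (linIdx (cumOf (PySem.Str.splitlines script) 0) pos) with hz | hp
  · simp [hz]
  · rw [if_neg (by omega), if_pos hp]
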